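-- pv_equiv track=rewrite | github.com/fabiogallotti/adventofcode | src/year2023/day13/functions.py | part_1
-- ===== SOURCE A (Python) =====
-- def preprocessing(data):
--     patterns = []
--     pattern = []
--     for row in data:
--         if row:
--             pattern.append(row)
--         else:
--             patterns.append(pattern)
--             pattern = []
--
--     patterns.append(pattern)
--     return patterns
--
-- def part_1(data):
--     patterns = preprocessing(data)
--
--     total = 0
--     for pattern in patterns:
--         if row := mirror_row(pattern):
--             total += row * 100
--
--         reverse = list(zip(*pattern))
--         if col := mirror_row(reverse):
--             total += col
--
--     return total
--
-- def mirror_row(pattern):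
--     for row in range(1, len(pattern)):
--         below = pattern[row:]
--         above = pattern[:row][::-1]
--
--         above = above[: len(below)]
--         below = below[: len(above)]
--
--         if above == below:
--             return row
-- ===== SOURCE B (Python) =====
-- def _expand(n, eq, lo, hi):
--     # two-pointer outward scan: True iff every in-bounds pair matches
--     while lo >= 0 and hi < n:
--         if not eq(lo, hi):
--             return False
--         lo -= 1
--         hi += 1
--     return True
--
--
-- def _split(data):
--     pats = []
--     start = 0
--     for i, row in enumerate(data):
--         if not row:
--             pats.append(data[start:i])
--             start = i + 1
--     pats.append(data[start:])
--     return pats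
--
--
-- def part_1(data):
--     total = 0
--     for pattern in _split(data):
--         h = len(pattern)
--         for i in range(1, h):
--             if _expand(h, lambda lo, hi: pattern[lo] == pattern[hi], i - 1, i):
--                 total += 100 * i
--                 break
--         w = min((len(r) for r in pattern), default=0)
--         for j in range(1, w):
--             if _expand(w, lambda lo, hi: all(r[lo] == r[hi] for r in pattern), j - 1, j):
--                 total += j
--                 break
--     return total
-- ===== Notes on version B (the rewrite author's own statement) =====
-- stated objective: faster
-- what changed: B splits the input into patterns by blank-line indices and list slices instead of an append-accumulator, and verifies each candidate mirror line with a two-pointer outward scan that compares columns in place across the rows, instead of A's building the zip-transpose and copying/reversing slices of the pattern for every candidate split.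
import Mathlib
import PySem

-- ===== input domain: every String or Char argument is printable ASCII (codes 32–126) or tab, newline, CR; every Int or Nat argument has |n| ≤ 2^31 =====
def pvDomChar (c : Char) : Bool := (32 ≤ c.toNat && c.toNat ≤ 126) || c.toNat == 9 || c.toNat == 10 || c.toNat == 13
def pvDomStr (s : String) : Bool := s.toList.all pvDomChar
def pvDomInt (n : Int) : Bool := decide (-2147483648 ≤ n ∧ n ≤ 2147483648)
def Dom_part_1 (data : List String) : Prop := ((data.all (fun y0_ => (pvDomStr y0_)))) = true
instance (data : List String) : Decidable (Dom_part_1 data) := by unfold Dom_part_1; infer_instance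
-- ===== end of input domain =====

-- B re-implements A with a different decomposition: blank lines are found by index and patterns cut
-- out of `data` as slices, and each mirror line is verified by a two-pointer outward scan — columns
-- are compared in place across the rows, without building the zip-transpose A materialises.
-- Equivalence of the RETURN value is proved on the whole domain (no Pre_; A is total).

-- ===== PORT A =====
-- preprocessing(data)
def pvPreprocessing (data : List String) : List (List String) :=
  let st := data.foldl
    (fun (st : List (List String) × List String) row =>
      if row ≠ "" then (st.1, st.2 ++ [row])          -- `if row:` → pattern.append(row)
      else (st.1 ++ [st.2], []))                       -- patterns.append(pattern); pattern = []
    ([], [])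
  st.1 ++ [st.2]

-- mirror_row(pattern); `pattern[:row][::-1]` ported as slice + List.reverse (= slice? … (-1), cf. PySem.List.slice?_none_none_neg_one)
def pvMirrorRow {α : Type} [DecidableEq α] (pattern : List α) : Option Int :=
  (PySem.List.pyRange 1 (pattern.length : Int) 1).findSome? (fun row =>
    let below := PySem.List.slice pattern (some row) none
    let above := (PySem.List.slice pattern none (some row)).reverse
    let above2 := PySem.List.slice above none (some (PySem.List.len below))
    let below2 := PySem.List.slice below none (some (PySem.List.len above2))
    if above2 = below2 then some row else none)

-- list(zip(*pattern)): tuples of chars modelled as List Char; stops at the shortest row (exact)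
def pvZipT (ls : List (List Char)) : List (List Char) :=
  if h : ls = [] ∨ ls.any List.isEmpty = true then []
  else (ls.map (fun l => l.headD ' ')) :: pvZipT (ls.map List.tail)
termination_by (ls.headD []).length
decreasing_by
  rw [not_or] at h
  obtain ⟨h1, h2⟩ := h
  cases ls with
  | nil => exact absurd rfl h1
  | cons x r =>
    simp only [List.any_eq_true, not_exists, not_and] at h2
    have hx : ¬ x.isEmpty = true := h2 x (by simp)
    simp only [List.headD_cons]
    cases x with
    | nil => exact absurd rfl hx
    | cons a t => simp

def part_1 (data : List String) : Int :=
  (pvPreprocessing data).foldl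
    (fun total pattern =>
      let t1 := match pvMirrorRow pattern with
        | some row => if row ≠ 0 then total + row * 100 else total   -- walrus `if row :=`: truthiness
        | none => total
      let reverse := pvZipT (pattern.map String.toList)
      match pvMirrorRow reverse with
        | some col => if col ≠ 0 then t1 + col else t1
        | none => t1)
    0

-- ===== PORT B =====
-- _expand(n, eq, lo, hi): two-pointer outward scan
def pvExpand (n : Int) (eq : Int → Int → Bool) (lo hi : Int) : Bool :=
  if _h : 0 ≤ lo ∧ hi < n then
    if eq lo hi then pvExpand n eq (lo - 1) (hi + 1) else false
  else true
termination_by (n - hi).toNat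
decreasing_by omega

-- the `for i in range(1, n): if _expand(…): …; break` loop shared by the row and column scans
def pvFindMirror (n : Int) (eq : Int → Int → Bool) : Option Int :=
  (PySem.List.pyRange 1 n 1).findSome? (fun i => if pvExpand n eq (i - 1) i then some i else none)

-- _split(data): the `for i, row in enumerate(data)` loop, carrying the running index
def pvSplitGo (data rows : List String) (i : Int) (pats : List (List String)) (start : Int) :
    List (List String) × Int :=
  match rows with
  | [] => (pats, start)
  | row :: rest =>
    if row = "" then
      pvSplitGo data rest (i + 1) (pats ++ [PySem.List.slice data (some start) (some i)]) (i + 1)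
    else pvSplitGo data rest (i + 1) pats start

def pvSplit (data : List String) : List (List String) :=
  let st := pvSplitGo data data 0 [] 0
  st.1 ++ [PySem.List.slice data (some st.2) none]

def part_1_alt (data : List String) : Int :=
  (pvSplit data).foldl
    (fun total pattern =>
      let t1 := match pvFindMirror (pattern.length : Int)
          (fun lo hi => PySem.List.pyGet? pattern lo == PySem.List.pyGet? pattern hi) with
        | some i => total + 100 * i
        | none => total
      let w : Int := PySem.List.minD (pattern.map PySem.Str.len) (fun x => x) 0
      match pvFindMirror w
          (fun lo hi => pattern.all (fun r => PySem.Str.pyGet? r lo == PySem.Str.pyGet? r hi)) with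
        | some j => t1 + j
        | none => t1)
    0

-- ===== PRECONDITION & SPEC =====
def Spec_part_1 (data : List String) (out : Int) : Prop := out = part_1_alt data
instance (data : List String) (out : Int) : Decidable (Spec_part_1 data out) := by unfold Spec_part_1; infer_instance

-- ===== CLAIM (what is proved, stated in full; the proofs are below) =====
def Claim_equal_part_1 : Prop := ∀ (data : List String), Dom_part_1 data → Spec_part_1 data (part_1 data)

-- ===== LEMMAS AND PROOFS =====

-- reference splitting of the rows at blank lines (proof-side only)
def pvSplitRec (cur : List String) : List String → List (List String)
  | [] => [cur]
  | row :: rest => if row = "" then cur :: pvSplitRec [] rest else pvSplitRec (cur ++ [row]) rest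

theorem pvPre_go (rows : List String) (pats : List (List String)) (cur : List String) :
    (rows.foldl
        (fun (st : List (List String) × List String) row =>
          if row ≠ "" then (st.1, st.2 ++ [row]) else (st.1 ++ [st.2], []))
        (pats, cur)).1 ++
      [(rows.foldl
        (fun (st : List (List String) × List String) row =>
          if row ≠ "" then (st.1, st.2 ++ [row]) else (st.1 ++ [st.2], []))
        (pats, cur)).2] = pats ++ pvSplitRec cur rows := by
  induction rows generalizing pats cur with
  | nil => simp [pvSplitRec]
  | cons row rest ih =>
    simp only [List.foldl_cons, pvSplitRec]
    by_cases hrow : row = ""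
    · subst hrow
      simp only [ne_eq, not_true_eq_false, if_false, reduceIte, ih]
      simp
    · simp only [if_pos hrow, if_neg hrow, ih]

theorem pvPreprocessing_eq_splitRec (data : List String) :
    pvPreprocessing data = pvSplitRec [] data := by
  have := pvPre_go data [] []
  simpa [pvPreprocessing] using this

theorem pvSplit_go (rest : List String) : ∀ (pre : List String) (pats : List (List String))
    (start : Nat), start ≤ pre.length →
    (pvSplitGo (pre ++ rest) rest (pre.length : Int) pats (start : Int)).1 ++
      [PySem.List.slice (pre ++ rest)
        (some (pvSplitGo (pre ++ rest) rest (pre.length : Int) pats (start : Int)).2) none]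
    = pats ++ pvSplitRec (pre.drop start) rest := by
  induction rest with
  | nil =>
    intro pre pats start hs
    simp [pvSplitGo, pvSplitRec, PySem.List.slice_from_natCast]
  | cons row rest ih =>
    intro pre pats start hs
    by_cases hrow : row = ""
    · subst hrow
      have hslice : PySem.List.slice (pre ++ "" :: rest) (some (start : Int))
          (some (pre.length : Int)) = pre.drop start := by
        rw [PySem.List.slice_natCast, List.drop_append_of_le_length hs]
        exact List.take_left' (by simp)
      have hdata : pre ++ "" :: rest = (pre ++ [""]) ++ rest := by simp
      simp only [pvSplitGo, reduceIte, hslice]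
      rw [hdata]
      have H := ih (pre ++ [""]) (pats ++ [pre.drop start]) (pre.length + 1) (by simp)
      have hlen : (pre ++ [""]).length = pre.length + 1 := by simp
      rw [hlen] at H
      push_cast at H
      rw [H]
      simp [pvSplitRec]
    · have hdata : pre ++ row :: rest = (pre ++ [row]) ++ rest := by simp
      simp only [pvSplitGo, if_neg hrow]
      rw [hdata]
      have H := ih (pre ++ [row]) pats start (by simp; omega)
      have hlen : (pre ++ [row]).length = pre.length + 1 := by simp
      rw [hlen] at H
      push_cast at H
      rw [H, List.drop_append_of_le_length hs]
      simp [pvSplitRec, hrow]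

theorem pvSplit_eq_splitRec (data : List String) :
    pvSplit data = pvSplitRec [] data := by
  have := pvSplit_go data [] [] 0 (by simp)
  simpa [pvSplit] using this

theorem pvFindSome?_congr {α β : Type} (l : List α) (f g : α → Option β)
    (h : ∀ x ∈ l, f x = g x) : l.findSome? f = l.findSome? g := by
  induction l with
  | nil => rfl
  | cons a t ih =>
    simp only [List.findSome?_cons, h a (by simp)]
    cases g a with
    | none => exact ih (fun x hx => h x (by simp [hx]))
    | some b => rfl

theorem pvExpand_true_iff (n : Int) (eq : Int → Int → Bool) (lo hi : Int) :
    pvExpand n eq lo hi = true ↔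
      ∀ k : Int, 0 ≤ k → 0 ≤ lo - k → hi + k < n → eq (lo - k) (hi + k) = true := by
  fun_induction pvExpand n eq lo hi with
  | case1 lo hi h he ih =>
    rw [ih]
    constructor
    · intro H k hk h1 h2
      rcases eq_or_lt_of_le hk with hk0 | hk1
      · have : lo - k = lo ∧ hi + k = hi := by omega
        rw [this.1, this.2]; exact he
      · have e1 : lo - 1 - (k - 1) = lo - k := by ring
        have e2 : hi + 1 + (k - 1) = hi + k := by ring
        have := H (k - 1) (by omega) (by omega) (by omega)
        rwa [e1, e2] at this
    · intro H k hk h1 h2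
      have e1 : lo - (k + 1) = lo - 1 - k := by ring
      have e2 : hi + (k + 1) = hi + 1 + k := by ring
      have := H (k + 1) (by omega) (by omega) (by omega)
      rwa [e1, e2] at this
  | case2 lo hi h he =>
    simp only [Bool.false_eq_true, false_iff]
    intro H
    have := H 0 le_rfl (by omega) (by omega)
    rw [sub_zero, add_zero] at this
    exact he this
  | case3 lo hi h =>
    simp only [true_iff]
    intro k hk h1 h2
    exact absurd (⟨by omega, by omega⟩ : 0 ≤ lo ∧ hi < n) h

theorem pvExpand_congr (n : Int) (e1 e2 : Int → Int → Bool)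
    (h : ∀ lo hi, 0 ≤ lo → lo ≤ hi → hi < n → e1 lo hi = e2 lo hi) :
    ∀ lo hi, lo ≤ hi → pvExpand n e1 lo hi = pvExpand n e2 lo hi := by
  intro lo hi hle
  rw [Bool.eq_iff_iff, pvExpand_true_iff, pvExpand_true_iff]
  constructor
  · intro H k hk h1 h2
    rw [← h (lo - k) (hi + k) (by omega) (by omega) (by omega)]
    exact H k hk h1 h2
  · intro H k hk h1 h2
    rw [h (lo - k) (hi + k) (by omega) (by omega) (by omega)]
    exact H k hk h1 h2

theorem pvFindMirror_congr (n : Int) (e1 e2 : Int → Int → Bool)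
    (h : ∀ lo hi, 0 ≤ lo → lo ≤ hi → hi < n → e1 lo hi = e2 lo hi) :
    pvFindMirror n e1 = pvFindMirror n e2 := by
  unfold pvFindMirror
  refine pvFindSome?_congr _ _ _ (fun i hi => ?_)
  rw [PySem.List.mem_pyRange_one] at hi
  rw [pvExpand_congr n e1 e2 h (i - 1) i (by omega)]

theorem pvFindMirror_pos {n : Int} {e : Int → Int → Bool} {r : Int}
    (h : pvFindMirror n e = some r) : 1 ≤ r := by
  unfold pvFindMirror at h
  obtain ⟨i, hm, hi⟩ := List.exists_of_findSome?_eq_some h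
  rw [PySem.List.mem_pyRange_one] at hm
  by_cases hb : pvExpand n e (i - 1) i = true
  · rw [if_pos hb] at hi
    injection hi with hi
    omega
  · rw [if_neg hb] at hi
    exact absurd hi (by simp)

-- A's truncated-slice test at split `row` equals B's two-pointer scan
theorem pvAbove2_len {α : Type} (l : List α) (r : Nat) (hr : r ≤ l.length) :
    ((l.take r).reverse.take (l.length - r)).length = min (l.length - r) r := by
  simp [List.length_take]
  omega

theorem pvAbove2_get {α : Type} (l : List α) (r i : Nat) (hr : r ≤ l.length) :
    ((l.take r).reverse.take (l.length - r))[i]? =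
      if i < min (l.length - r) r then l[r - 1 - i]? else none := by
  by_cases him : i < min (l.length - r) r
  · rw [if_pos him, List.getElem?_take, if_pos (by omega)]
    rw [List.getElem?_reverse (by simp [List.length_take]; omega)]
    have e : (l.take r).length - 1 - i = r - 1 - i := by
      simp [List.length_take]; omega
    rw [e, List.getElem?_take, if_pos (by omega)]
  · rw [if_neg him]
    by_cases hnr : i < l.length - r
    · rw [List.getElem?_take, if_pos hnr]
      apply List.getElem?_eq_none
      simp [List.length_take]; omega
    · rw [List.getElem?_take, if_neg hnr]

theorem pvBelow2_get {α : Type} (l : List α) (r i m : Nat) :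
    ((l.drop r).take m)[i]? = if i < m then l[r + i]? else none := by
  simp [List.getElem?_take, List.getElem?_drop]

theorem pvMirrorRow_eq_find {α : Type} [DecidableEq α] (l : List α) :
    pvMirrorRow l = pvFindMirror (l.length : Int)
      (fun lo hi => decide (PySem.List.pyGet? l lo = PySem.List.pyGet? l hi)) := by
  unfold pvMirrorRow pvFindMirror
  refine pvFindSome?_congr _ _ _ (fun row hrow => ?_)
  rw [PySem.List.mem_pyRange_one] at hrow
  have hrn : row = ((row.toNat : Nat) : Int) := by omega
  have hr1 : 1 ≤ row.toNat := by omega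
  have hr2 : row.toNat < l.length := by omega
  generalize hgen : row.toNat = r at hrn hr1 hr2
  rw [hrn]
  simp only [PySem.List.len_eq, PySem.List.slice_from_natCast, PySem.List.slice_to_natCast,
    List.length_drop]
  rw [pvAbove2_len l r (le_of_lt hr2)]
  refine if_congr ?_ rfl rfl
  rw [pvExpand_true_iff]
  constructor
  · intro he k hk hk1 hk2
    have hk1' : k ≤ (r : Int) - 1 := by omega
    have hk2' : (r : Int) + k < (l.length : Int) := by omega
    have e0 : ((r : Int) - 1 - k).toNat = r - 1 - k.toNat := by omega
    have e1 : ((r : Int) + k).toNat = r + k.toNat := by omega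
    rw [decide_eq_true_eq, PySem.List.pyGet?_of_nonneg l (by omega),
      PySem.List.pyGet?_of_nonneg l (by omega), e0, e1]
    have hgi := congrArg (fun t => t[k.toNat]?) he
    simp only at hgi
    rw [pvAbove2_get l r k.toNat (by omega), pvBelow2_get, if_pos (by omega), if_pos (by omega)]
      at hgi
    exact hgi
  · intro hq
    apply List.ext_getElem?
    intro i
    rw [pvAbove2_get l r i (by omega), pvBelow2_get]
    by_cases him : i < min (l.length - r) r
    · rw [if_pos him, if_pos him]
      have hqi := hq (i : Int) (by omega) (by omega) (by omega)
      rw [decide_eq_true_eq, PySem.List.pyGet?_of_nonneg l (by omega),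
        PySem.List.pyGet?_of_nonneg l (by omega)] at hqi
      have e0 : ((r : Int) - 1 - (i : Int)).toNat = r - 1 - i := by omega
      have e1 : ((r : Int) + (i : Int)).toNat = r + i := by omega
      rwa [e0, e1] at hqi
    · rw [if_neg him, if_neg him]

-- zip(*pattern): length and entries
theorem pvZipT_spec (ls : List (List Char)) :
    (∀ l ∈ ls, (pvZipT ls).length ≤ l.length) ∧
    (ls ≠ [] → ∃ l ∈ ls, l.length = (pvZipT ls).length) ∧
    (∀ i (h : i < (pvZipT ls).length), (pvZipT ls)[i] = ls.map (fun l => l.getD i ' ')) := by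
  suffices H : ∀ (L : Nat) (ls : List (List Char)), (ls.headD []).length = L →
      (∀ l ∈ ls, (pvZipT ls).length ≤ l.length) ∧
      (ls ≠ [] → ∃ l ∈ ls, l.length = (pvZipT ls).length) ∧
      (∀ i (h : i < (pvZipT ls).length), (pvZipT ls)[i] = ls.map (fun l => l.getD i ' ')) by
    exact H _ ls rfl
  intro L
  induction L using Nat.strong_induction_on with
  | _ L IH =>
  intro ls hL
  rw [pvZipT]
  by_cases h : ls = [] ∨ ls.any List.isEmpty = true
  · rw [dif_pos h]
    refine ⟨fun l hl => by simp, fun hne => ?_, fun i hi => by simp at hi⟩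
    rcases h with h1 | h2
    · exact absurd h1 hne
    · obtain ⟨l, hl, he⟩ := List.any_eq_true.mp h2
      exact ⟨l, hl, by simpa [List.isEmpty_iff] using he⟩
  · rw [dif_neg h]
    rw [not_or] at h
    obtain ⟨hne, hemp⟩ := h
    simp only [List.any_eq_true, not_exists, not_and] at hemp
    have hnonempty : ∀ l ∈ ls, l ≠ [] := by
      intro l hl
      have := hemp l hl
      simpa [List.isEmpty_iff] using this
    obtain ⟨x, r, rfl⟩ := List.exists_cons_of_ne_nil hne
    have hxne : x ≠ [] := hnonempty x (by simp)
    have hmeas : (((x :: r).map List.tail).headD []).length < L := by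
      simp only [List.map_cons, List.headD_cons] at hL ⊢
      obtain ⟨a, t, rfl⟩ := List.exists_cons_of_ne_nil hxne
      simp at hL ⊢
      omega
    obtain ⟨ihA, ihB, ihC⟩ := IH _ hmeas ((x :: r).map List.tail) rfl
    refine ⟨?_, ?_, ?_⟩
    · intro l hl
      have hZ := ihA l.tail (List.mem_map_of_mem hl)
      have hl0 : l ≠ [] := hnonempty l hl
      have h1 : 1 ≤ l.length := List.length_pos_iff.mpr hl0
      have hlt : l.tail.length = l.length - 1 := by simp
      simp only [List.length_cons]
      omega
    · intro _
      obtain ⟨t, ht, htl⟩ := ihB (by simp)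
      obtain ⟨l, hl, rfl⟩ := List.mem_map.mp ht
      refine ⟨l, hl, ?_⟩
      have hl0 : l ≠ [] := hnonempty l hl
      have h1 : 1 ≤ l.length := List.length_pos_iff.mpr hl0
      have hlt : l.tail.length = l.length - 1 := by simp
      simp only [List.length_cons]
      omega
    · intro i hi
      cases i with
      | zero =>
        simp only [List.getElem_cons_zero]
        refine List.map_congr_left (fun l hl => ?_)
        obtain ⟨a, t, rfl⟩ := List.exists_cons_of_ne_nil (hnonempty l hl)
        rfl
      | succ i =>
        simp only [List.getElem_cons_succ]
        have hi' : i < (pvZipT ((x :: r).map List.tail)).length := by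
          simp only [List.length_cons] at hi
          omega
        rw [ihC i hi', List.map_map]
        refine List.map_congr_left (fun l hl => ?_)
        obtain ⟨a, t, rfl⟩ := List.exists_cons_of_ne_nil (hnonempty l hl)
        rfl

theorem pvZipT_length (pattern : List String) :
    ((pvZipT (pattern.map String.toList)).length : Int)
      = PySem.List.minD (pattern.map PySem.Str.len) (fun x => x) 0 := by
  cases pattern with
  | nil =>
    have hz : pvZipT (List.map String.toList []) = [] := by
      rw [pvZipT]
      simp
    rw [hz, List.map_nil, PySem.List.minD, (PySem.List.min?_eq_none_iff _ _).mpr rfl]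
    rfl
  | cons p rest =>
    obtain ⟨hA, hB, _⟩ := pvZipT_spec ((p :: rest).map String.toList)
    rw [PySem.List.minD,
      show (List.map PySem.Str.len (p :: rest)) = PySem.Str.len p :: List.map PySem.Str.len rest
        from rfl,
      PySem.List.min?_id_cons, Option.getD_some]
    set Z := (pvZipT ((p :: rest).map String.toList)).length with hZ
    set F := ((rest.map PySem.Str.len).foldl min (PySem.Str.len p)) with hF
    have hFle : ∀ s ∈ p :: rest, F ≤ (s.toList.length : Int) := by
      intro s hs
      rcases List.mem_cons.mp hs with rfl | hs'
      · rw [← PySem.Str.len_eq]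
        exact (PySem.List.foldl_min_le _ _).1
      · rw [← PySem.Str.len_eq]
        exact (PySem.List.foldl_min_le _ _).2 _ (List.mem_map_of_mem hs')
    have hFmem : ∃ s ∈ p :: rest, F = (s.toList.length : Int) := by
      rcases PySem.List.foldl_min_mem (rest.map PySem.Str.len) (PySem.Str.len p) with h0 | h0
      · exact ⟨p, by simp, by rw [← PySem.Str.len_eq]; exact h0⟩
      · obtain ⟨s, hs, hse⟩ := List.mem_map.mp h0
        exact ⟨s, by simp [hs], by rw [← PySem.Str.len_eq, hse]⟩
    have hZle : ∀ s ∈ p :: rest, (Z : Int) ≤ (s.toList.length : Int) := by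
      intro s hs
      have := hA s.toList (List.mem_map_of_mem hs)
      exact_mod_cast this
    have hZmem : ∃ s ∈ p :: rest, (s.toList.length : Int) = (Z : Int) := by
      obtain ⟨t, ht, hte⟩ := hB (by simp)
      obtain ⟨s, hs, rfl⟩ := List.mem_map.mp ht
      exact ⟨s, hs, by exact_mod_cast hte⟩
    obtain ⟨s0, hs0, he0⟩ := hFmem
    obtain ⟨s1, hs1, he1⟩ := hZmem
    have h1 : (Z : Int) ≤ F := he0 ▸ hZle s0 hs0
    have h2 : F ≤ (Z : Int) := he1 ▸ hFle s1 hs1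
    omega

-- per-pattern step equality
theorem pvStep_eq (pattern : List String) (total : Int) :
    (let t1 := match pvMirrorRow pattern with
        | some row => if row ≠ 0 then total + row * 100 else total
        | none => total
      let reverse := pvZipT (pattern.map String.toList)
      match pvMirrorRow reverse with
        | some col => if col ≠ 0 then t1 + col else t1
        | none => t1)
    = (let t1 := match pvFindMirror (pattern.length : Int)
          (fun lo hi => PySem.List.pyGet? pattern lo == PySem.List.pyGet? pattern hi) with
        | some i => total + 100 * i
        | none => total
      let w : Int := PySem.List.minD (pattern.map PySem.Str.len) (fun x => x) 0
      match pvFindMirror w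
          (fun lo hi => pattern.all (fun r => PySem.Str.pyGet? r lo == PySem.Str.pyGet? r hi)) with
        | some j => t1 + j
        | none => t1) := by
  have hagree : ∀ lo hi : Int, 0 ≤ lo → lo ≤ hi →
      hi < ((pvZipT (pattern.map String.toList)).length : Int) →
      (decide (PySem.List.pyGet? (pvZipT (pattern.map String.toList)) lo =
        PySem.List.pyGet? (pvZipT (pattern.map String.toList)) hi))
      = pattern.all (fun r => PySem.Str.pyGet? r lo == PySem.Str.pyGet? r hi) := by
    intro lo hi h0 h1 h2
    obtain ⟨hA, -, hC⟩ := pvZipT_spec (pattern.map String.toList)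
    have hlo : lo.toNat < (pvZipT (pattern.map String.toList)).length := by omega
    have hhi : hi.toNat < (pvZipT (pattern.map String.toList)).length := by omega
    rw [Bool.eq_iff_iff, decide_eq_true_eq, List.all_eq_true]
    rw [PySem.List.pyGet?_eq_some_getElem _ h0 (by omega),
      PySem.List.pyGet?_eq_some_getElem _ (by omega) (by omega)]
    rw [Option.some_inj, hC lo.toNat hlo, hC hi.toNat hhi, List.map_inj_left]
    rw [List.forall_mem_map]
    constructor
    · intro H r hr
      have hlen := hA r.toList (List.mem_map_of_mem hr)
      have := H r hr
      rw [List.getD_eq_getElem _ _ (by omega), List.getD_eq_getElem _ _ (by omega)] at this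
      simp only [PySem.Str.pyGet?, PySem.Chars.pyGet?]
      rw [beq_iff_eq, PySem.List.pyGet?_eq_some_getElem _ h0 (by omega),
        PySem.List.pyGet?_eq_some_getElem _ (by omega) (by omega), Option.some_inj]
      exact this
    · intro H r hr
      have hlen := hA r.toList (List.mem_map_of_mem hr)
      have := H r hr
      simp only [PySem.Str.pyGet?, PySem.Chars.pyGet?] at this
      rw [beq_iff_eq, PySem.List.pyGet?_eq_some_getElem _ h0 (by omega),
        PySem.List.pyGet?_eq_some_getElem _ (by omega) (by omega), Option.some_inj] at this
      rw [List.getD_eq_getElem _ _ (by omega), List.getD_eq_getElem _ _ (by omega)]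
      exact this
  dsimp only
  rw [pvMirrorRow_eq_find pattern, pvMirrorRow_eq_find (pvZipT (pattern.map String.toList)),
    ← pvZipT_length pattern]
  have hrowfun : (fun lo hi => decide (PySem.List.pyGet? pattern lo = PySem.List.pyGet? pattern hi))
      = (fun lo hi => PySem.List.pyGet? pattern lo == PySem.List.pyGet? pattern hi) := by
    funext lo hi
    rw [Bool.eq_iff_iff, decide_eq_true_eq, beq_iff_eq]
  rw [hrowfun]
  have hcongr := pvFindMirror_congr _ _ _ hagree
  rw [hcongr]
  rcases h1 : pvFindMirror (pattern.length : Int)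
      (fun lo hi => PySem.List.pyGet? pattern lo == PySem.List.pyGet? pattern hi) with - | r
  · rcases h2 : pvFindMirror ((pvZipT (pattern.map String.toList)).length : Int)
        (fun lo hi => pattern.all (fun r => PySem.Str.pyGet? r lo == PySem.Str.pyGet? r hi))
      with - | c
    · rfl
    · have hc := pvFindMirror_pos h2
      simp only []
      rw [if_pos (show c ≠ 0 by omega)]
  · have hr := pvFindMirror_pos h1
    rcases h2 : pvFindMirror ((pvZipT (pattern.map String.toList)).length : Int)
        (fun lo hi => pattern.all (fun r => PySem.Str.pyGet? r lo == PySem.Str.pyGet? r hi))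
      with - | c
    · simp only []
      rw [if_pos (show r ≠ 0 by omega)]
      ring
    · have hc := pvFindMirror_pos h2
      simp only []
      rw [if_pos (show r ≠ 0 by omega), if_pos (show c ≠ 0 by omega)]
      ring

-- ===== VERDICT (by name: the statement is the Claim_ definition above) =====
theorem part_1_spec : Claim_equal_part_1 := by
  intro data _
  unfold Spec_part_1 part_1 part_1_alt
  rw [pvPreprocessing_eq_splitRec, ← pvSplit_eq_splitRec]
  refine PySem.List.foldl_congr_mem _ _ _ _ ?_
  intro total pattern _
  exact pvStep_eq pattern total
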